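-- pv_equiv track=rewrite | github.com/abhijeet24patil/Differential-Private-Random-Forest | Mdrf.py | max_At
-- ===== SOURCE A (Python) =====
-- def max_At(A,dat):
--     ind=[]
--     for i in A:
--         a=A.index(i)
--         ind.append(a)
--     cc=[]
--     for i in ind:
--         cl=[ex[i]for ex in dat]
--         xc=len(set(cl))
--         cc.append(xc)
--     return max(cc)
-- ===== SOURCE B (Python) =====
-- def max_At(A, dat):
--     # first-occurrence column indices, one seen-set pass
--     seen = set()
--     need = []
--     for i, v in enumerate(A):
--         if v not in seen:
--             seen.add(v)
--             need.append(i)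
--     # ONE row-major pass over dat, growing one value-set per needed column
--     sets = [set() for _ in need]
--     for row in dat:
--         for s, j in zip(sets, need):
--             s.add(row[j])
--     return max(len(s) for s in sets)
-- ===== Notes on version B (the rewrite author's own statement) =====
-- stated objective: faster
-- what changed: B collects the distinct first-occurrence column indices with one seen-set pass (instead of A's per-element A.index scan over a list with duplicates) and replaces A's per-index full-column extraction from dat (one scan of dat per entry of A, duplicates included) by a single row-major pass over dat that grows one value-set per needed column in parallel.
import Mathlib
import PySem

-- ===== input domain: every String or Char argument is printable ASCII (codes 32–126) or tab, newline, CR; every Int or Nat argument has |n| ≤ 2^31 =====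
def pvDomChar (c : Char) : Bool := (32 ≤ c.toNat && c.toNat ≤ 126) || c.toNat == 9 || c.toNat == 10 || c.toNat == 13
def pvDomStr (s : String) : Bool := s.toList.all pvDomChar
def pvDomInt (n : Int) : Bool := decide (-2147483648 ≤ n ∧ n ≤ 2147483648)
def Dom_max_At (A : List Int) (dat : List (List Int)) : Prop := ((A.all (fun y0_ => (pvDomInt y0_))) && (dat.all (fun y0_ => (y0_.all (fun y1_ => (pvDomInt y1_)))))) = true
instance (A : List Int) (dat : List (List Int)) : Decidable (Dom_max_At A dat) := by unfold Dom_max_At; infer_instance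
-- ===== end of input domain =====

-- B: the distinct first-occurrence column indices are collected by one seen-set pass
-- (not A's per-element A.index scan), and instead of extracting a full column of dat per
-- entry of A, ONE row-major pass over dat grows one value-set per needed column in parallel.

-- ===== PORT A =====
def max_At (A : List Int) (dat : List (List Int)) : Int :=
  let ind : List Int := A.foldl (fun acc i => acc ++ [(((PySem.List.index? A i).getD 0 : Nat) : Int)]) []
  let cc : List Int := ind.foldl (fun acc i =>
      acc ++ [PySem.Set.len (PySem.Set.ofList (dat.map (fun ex => PySem.List.pyGetD ex i 0)))]) []
  (PySem.List.max? cc (fun x => x)).getD 0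

-- ===== PORT B =====
def max_At_alt (A : List Int) (dat : List (List Int)) : Int :=
  let sn : PySem.Set Int × List Int := (PySem.List.enumerate A 0).foldl
      (fun sn iv => if PySem.Set.contains sn.1 iv.2 then sn
                    else (PySem.Set.add sn.1 iv.2, sn.2 ++ [iv.1]))
      (PySem.Set.empty, [])
  let need : List Int := sn.2
  let sets : List (PySem.Set Int) := dat.foldl
      (fun sets row => (sets.zip need).map
        (fun sj => PySem.Set.add sj.1 (PySem.List.pyGetD row sj.2 0)))
      (need.map (fun _ => PySem.Set.empty))
  (PySem.List.max? (sets.map (fun s => PySem.Set.len s)) (fun x => x)).getD 0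

-- ===== PRECONDITION & SPEC =====
-- Pre_ excludes exactly where the Python A raises: ValueError (max of an empty list) when A = [],
-- and IndexError when some row of dat is too short for a first-occurrence column index of A.
def Pre_max_At (A : List Int) (dat : List (List Int)) : Prop :=
  A ≠ [] ∧ ∀ row ∈ dat, ∀ i ∈ List.range A.length, A.getD i 0 ∉ A.take i → (i : Int) < row.length
instance (A : List Int) (dat : List (List Int)) : Decidable (Pre_max_At A dat) := by
  unfold Pre_max_At; infer_instance
def pvWitness_max_At : List Int × List (List Int) := ([3, 1, 3], [[1, 2, 0], [1, 5, 0]])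

def Spec_max_At (A : List Int) (dat : List (List Int)) (out : Int) : Prop := out = max_At_alt A dat
instance (A : List Int) (dat : List (List Int)) (out : Int) : Decidable (Spec_max_At A dat out) := by unfold Spec_max_At; infer_instance

-- ===== CLAIM (what is proved, stated in full; the proofs are below) =====
def Claim_equal_max_At : Prop := ∀ (A : List Int) (dat : List (List Int)), Dom_max_At A dat → Pre_max_At A dat → Spec_max_At A dat (max_At A dat)

-- ===== LEMMAS AND PROOFS =====

-- the per-column distinct count both programs compute for column index j
def pvCnt (dat : List (List Int)) (j : Int) : Int :=
  PySem.Set.len (PySem.Set.ofList (dat.map (fun ex => PySem.List.pyGetD ex j 0)))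

-- B's list of needed column indices (the seen-set fold)
def pvNeed (A : List Int) : List Int :=
  ((PySem.List.enumerate A 0).foldl
      (fun sn iv => if PySem.Set.contains sn.1 iv.2 then sn
                    else (PySem.Set.add sn.1 iv.2, sn.2 ++ [iv.1]))
      (PySem.Set.empty, [])).2

lemma mem_fold_need (t : List Int) (s : Int) (seen : PySem.Set Int) (acc : List Int)
    (pref : List Int) (hseen : ∀ v, PySem.Set.contains seen v = true ↔ v ∈ pref) (x : Int) :
    (x ∈ ((PySem.List.enumerate t s).foldl
        (fun sn iv => if PySem.Set.contains sn.1 iv.2 then sn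
                      else (PySem.Set.add sn.1 iv.2, sn.2 ++ [iv.1])) (seen, acc)).2)
      ↔ x ∈ acc ∨ ∃ k : Nat, ∃ h : k < t.length,
          x = s + k ∧ t[k] ∉ pref ∧ t[k] ∉ t.take k := by
  induction t generalizing s seen acc pref with
  | nil => simp [PySem.List.enumerate]
  | cons a t ih =>
    rw [PySem.List.enumerate_cons]
    simp only [List.foldl_cons]
    by_cases ha : a ∈ pref
    · rw [if_pos ((hseen a).mpr ha)]
      rw [ih (s + 1) seen acc (pref ++ [a])
        (fun v => by
          rw [hseen v]; simp only [List.mem_append, List.mem_singleton]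
          exact ⟨Or.inl, fun h => h.elim id (fun h => h ▸ ha)⟩)]
      constructor
      · rintro (h | ⟨k, hk, h1, h2, h3⟩)
        · exact Or.inl h
        · simp only [List.mem_append, List.mem_singleton] at h2
          refine Or.inr ⟨k + 1, by simpa using hk, by push_cast; omega, ?_, ?_⟩
          · simpa using fun hc => h2 (Or.inl hc)
          · simp only [List.getElem_cons_succ, List.take_succ_cons, List.mem_cons] at h3 ⊢
            intro hc
            rcases hc with hc | hc
            · exact h2 (Or.inr hc)
            · exact h3 hc
      · rintro (h | ⟨k, hk, h1, h2, h3⟩)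
        · exact Or.inl h
        · cases k with
          | zero => simp at h1 h2 ⊢; exact absurd ha h2
          | succ k =>
            refine Or.inr ⟨k, by simpa using hk, by push_cast at h1 ⊢; omega, ?_, ?_⟩
            · simp only [List.getElem_cons_succ] at h2 h3
              simp only [List.take_succ_cons, List.mem_cons] at h3
              simp only [List.mem_append, List.mem_singleton]
              tauto
            · simp only [List.getElem_cons_succ, List.take_succ_cons, List.mem_cons] at h3
              tauto
    · rw [if_neg (by rw [hseen a] at *; simpa using ha)]
      rw [ih (s + 1) _ _ (pref ++ [a])
        (fun v => by
          rw [PySem.Set.contains_iff, PySem.Set.mem_add, ← PySem.Set.contains_iff, hseen v]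
          simp)]
      simp only [List.mem_append, List.mem_singleton]
      constructor
      · rintro ((h | h) | ⟨k, hk, h1, h2, h3⟩)
        · exact Or.inl h
        · exact Or.inr ⟨0, by simp, by simp [h], ha, by simp⟩
        · refine Or.inr ⟨k + 1, by simpa using hk, by push_cast; omega, ?_, ?_⟩
          · simpa using fun hc => h2 (Or.inl hc)
          · simp only [List.getElem_cons_succ, List.take_succ_cons, List.mem_cons]
            intro hc
            rcases hc with hc | hc
            · exact h2 (Or.inr hc)
            · exact h3 hc
      · rintro (h | ⟨k, hk, h1, h2, h3⟩)
        · exact Or.inl (Or.inl h)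
        · cases k with
          | zero => exact Or.inl (Or.inr (by simpa using h1))
          | succ k =>
            refine Or.inr ⟨k, by simpa using hk, by push_cast at h1 ⊢; omega, ?_, ?_⟩
            · simp only [List.getElem_cons_succ] at h2 h3
              simp only [List.take_succ_cons, List.mem_cons] at h3
              tauto
            · simp only [List.getElem_cons_succ, List.take_succ_cons, List.mem_cons] at h3
              tauto

lemma mem_pvNeed_iff (A : List Int) (x : Int) :
    x ∈ pvNeed A ↔ ∃ k : Nat, ∃ h : k < A.length, x = (k : Int) ∧ A[k] ∉ A.take k := by
  rw [pvNeed, mem_fold_need A 0 PySem.Set.empty [] [] (fun v => by simp [PySem.Set.empty]) x]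
  simp

lemma mem_ind_iff_mem_need (A : List Int) (x : Int) :
    x ∈ A.map (fun v => (((PySem.List.index? A v).getD 0 : Nat) : Int)) ↔ x ∈ pvNeed A := by
  rw [mem_pvNeed_iff]
  constructor
  · rintro h
    obtain ⟨v, hv, rfl⟩ := List.mem_map.mp h
    obtain ⟨k, hk⟩ := Option.isSome_iff_exists.mp ((PySem.List.index?_isSome_iff A v).mpr hv)
    obtain ⟨hlt, hget, hbefore⟩ := PySem.List.getElem_of_index?_eq_some hk
    refine ⟨k, hlt, by rw [hk]; rfl, ?_⟩
    rw [hget]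
    intro hmem
    obtain ⟨j, hj, hje⟩ := List.mem_take_iff_getElem.mp hmem
    exact hbefore j (by omega) hje
  · rintro ⟨k, hk, rfl, hnot⟩
    have hidx : PySem.List.index? A A[k] = some k := by
      rw [PySem.List.index?_eq_some_iff]
      refine ⟨A.take k, A.drop (k + 1), ?_, by simp [Nat.min_eq_left (le_of_lt hk)], hnot⟩
      conv_lhs => rw [← List.take_append_drop k A]
      rw [List.drop_eq_getElem_cons hk]
    exact List.mem_map.mpr ⟨A[k], List.getElem_mem hk, by rw [hidx]; rfl⟩

-- one step of B's inner zip loop, on an accumulator aligned with need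
lemma zip_map_step (need : List Int) (f : Int → PySem.Set Int) (g : Int → Int) :
    ((need.map f).zip need).map (fun sj => PySem.Set.add sj.1 (g sj.2))
      = need.map (fun j => PySem.Set.add (f j) (g j)) := by
  induction need with
  | nil => rfl
  | cons a t ih => simp only [List.map_cons, List.zip_cons_cons, ih]

-- B's row fold keeps the accumulator aligned with need, folding each column independently
lemma fold_sets (dat : List (List Int)) (need : List Int) (f : Int → PySem.Set Int) :
    dat.foldl
      (fun sets row => (sets.zip need).map
        (fun sj => PySem.Set.add sj.1 (PySem.List.pyGetD row sj.2 0)))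
      (need.map f)
    = need.map (fun j => dat.foldl (fun s row => PySem.Set.add s (PySem.List.pyGetD row j 0)) (f j)) := by
  induction dat generalizing f with
  | nil => rfl
  | cons row rest ih =>
    simp only [List.foldl_cons]
    rw [zip_map_step need f (fun j => PySem.List.pyGetD row j 0),
      ih (fun j => PySem.Set.add (f j) (PySem.List.pyGetD row j 0))]

lemma col_fold_eq_cnt (dat : List (List Int)) (j : Int) :
    PySem.Set.len
      (dat.foldl (fun s row => PySem.Set.add s (PySem.List.pyGetD row j 0)) PySem.Set.empty)
      = pvCnt dat j := by
  unfold pvCnt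
  rw [PySem.Set.ofList_eq_foldl, ← List.foldl_map]
  rfl

lemma max_getD_eq_of_same_mem (l1 l2 : List Int) (f : Int → Int)
    (h : ∀ x, x ∈ l1 ↔ x ∈ l2) :
    (PySem.List.max? (l1.map f) (fun x => x)).getD 0
      = (PySem.List.max? (l2.map f) (fun x => x)).getD 0 := by
  rcases hm1 : PySem.List.max? (l1.map f) (fun x => x) with _ | m1
  · have h1 : l1 = [] := by simpa using (PySem.List.max?_eq_none_iff _ _).mp hm1
    have h2 : l2 = [] := by
      cases h2 : l2 with
      | nil => rfl
      | cons a t => exact absurd ((h a).mpr (by simp [h2])) (by simp [h1])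
    rw [(PySem.List.max?_eq_none_iff (l2.map f) (fun x => x)).mpr (by simp [h2])]
  · rcases hm2 : PySem.List.max? (l2.map f) (fun x => x) with _ | m2
    · have h2 : l2 = [] := by simpa using (PySem.List.max?_eq_none_iff _ _).mp hm2
      have h1 : l1 = [] := by
        cases h1 : l1 with
        | nil => rfl
        | cons a t => exact absurd ((h a).mp (by simp [h1])) (by simp [h2])
      rw [h1] at hm1
      simp [PySem.List.max?] at hm1
    · have h1m := PySem.List.max?_mem hm1
      have h2m := PySem.List.max?_mem hm2
      have hle1 : m1 ≤ m2 := by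
        obtain ⟨x, hx, rfl⟩ := List.mem_map.mp h1m
        exact PySem.List.max?_isMax hm2 _ (List.mem_map_of_mem ((h x).mp hx))
      have hle2 : m2 ≤ m1 := by
        obtain ⟨x, hx, rfl⟩ := List.mem_map.mp h2m
        exact PySem.List.max?_isMax hm1 _ (List.mem_map_of_mem ((h x).mpr hx))
      simp [le_antisymm hle1 hle2]

-- ===== VERDICT (by name: the statement is the Claim_ definition above) =====
theorem max_At_spec : Claim_equal_max_At := by
  intro A dat _ _
  unfold Spec_max_At max_At max_At_alt
  simp only [PySem.List.foldl_append_singleton_eq_map, List.nil_append]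
  have hneed : ((PySem.List.enumerate A 0).foldl
      (fun sn iv => if PySem.Set.contains sn.1 iv.2 then sn
                    else (PySem.Set.add sn.1 iv.2, sn.2 ++ [iv.1]))
      ((PySem.Set.empty : PySem.Set Int), ([] : List Int))).2 = pvNeed A := rfl
  rw [hneed, fold_sets dat (pvNeed A) (fun _ => PySem.Set.empty)]
  have hBeq : (List.map (fun j =>
        dat.foldl (fun s row => PySem.Set.add s (PySem.List.pyGetD row j 0)) PySem.Set.empty)
        (pvNeed A)).map (fun s => PySem.Set.len s) = (pvNeed A).map (pvCnt dat) := by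
    rw [List.map_map]
    exact List.map_congr_left (fun j _ => col_fold_eq_cnt dat j)
  rw [hBeq]
  exact max_getD_eq_of_same_mem _ _ (pvCnt dat) (mem_ind_iff_mem_need A)
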